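-- pv_equiv track=rewrite | github.com/lindalw/CDM | photobook_dataset/discriminator/helpers.py | get_conditions_inds
-- ===== SOURCE A (Python) =====
-- def get_conditions_inds(dataframe):
--     """Sort segment indices of the dataframe with history and no history model in the conditions"""
--     # History, no history
--     conditions_inds = {'hT_nhT':[], 'hT_nhF':[], 'hF_nhT':[], 'hF_nhF':[], 'only_h':[], 'only_nh':[], 'nothing':[], 'all':[], 'h_nh_all':[]}
--     for ind in dataframe:
--         # For all indices with the same
--         if 'History' in dataframe[ind] and 'No history' in dataframe[ind]:
--             if dataframe[ind]['History'] == 1 and dataframe[ind]['No history'] == 1: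
--                 conditions_inds['hT_nhT'].append(ind)
--
--             elif dataframe[ind]['History'] == 1 and dataframe[ind]['No history'] == 0:
--                 conditions_inds['hT_nhF'].append(ind)
--
--             elif dataframe[ind]['History'] == 0 and dataframe[ind]['No history'] == 1:
--                 conditions_inds['hF_nhT'].append(ind)
--
--             elif dataframe[ind]['History'] == 0 and dataframe[ind]['No history'] == 0:
--                 conditions_inds['hF_nhF'].append(ind)
--             # For all segments that were predicted in history and no history
--             conditions_inds['h_nh_all'].append(ind)
--
--         elif 'History' in dataframe[ind]:
--             conditions_inds['only_h'].append(ind)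
--
--         elif 'No history' in dataframe[ind]:
--             conditions_inds['only_nh'].append(ind)
--         else:
--             conditions_inds['nothing'].append(ind)
--         # For all segments together
--         conditions_inds['all'].append(ind)
--
--     return conditions_inds
-- ===== SOURCE B (Python) =====
-- def get_conditions_inds(dataframe):
--     """Sort segment indices of the dataframe with history and no history model in the conditions"""
--     rows = [(ind, dataframe[ind]) for ind in dataframe]
--     h_nh = [(i, r) for (i, r) in rows if 'History' in r and 'No history' in r]
--     pair = lambda r: (r.get('History'), r.get('No history'))
--     return {
--         'hT_nhT': [i for (i, r) in h_nh if pair(r) == (1, 1)],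
--         'hT_nhF': [i for (i, r) in h_nh if pair(r) == (1, 0)],
--         'hF_nhT': [i for (i, r) in h_nh if pair(r) == (0, 1)],
--         'hF_nhF': [i for (i, r) in h_nh if pair(r) == (0, 0)],
--         'only_h': [i for (i, r) in rows if 'History' in r and 'No history' not in r],
--         'only_nh': [i for (i, r) in rows if 'History' not in r and 'No history' in r],
--         'nothing': [i for (i, r) in rows if 'History' not in r and 'No history' not in r],
--         'all': [i for (i, _) in rows],
--         'h_nh_all': [i for (i, _) in h_nh],
--     }
-- ===== Notes on version B (the rewrite author's own statement) =====
-- stated objective: alternative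
-- what changed: A's single pass with one if/elif tree appending into a shared dict of lists is replaced by an independent comprehension/filter pass per bucket (rows and the history∧no-history sublist computed once, each bucket a separate filter), same O(n) cost class.
import Mathlib
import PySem

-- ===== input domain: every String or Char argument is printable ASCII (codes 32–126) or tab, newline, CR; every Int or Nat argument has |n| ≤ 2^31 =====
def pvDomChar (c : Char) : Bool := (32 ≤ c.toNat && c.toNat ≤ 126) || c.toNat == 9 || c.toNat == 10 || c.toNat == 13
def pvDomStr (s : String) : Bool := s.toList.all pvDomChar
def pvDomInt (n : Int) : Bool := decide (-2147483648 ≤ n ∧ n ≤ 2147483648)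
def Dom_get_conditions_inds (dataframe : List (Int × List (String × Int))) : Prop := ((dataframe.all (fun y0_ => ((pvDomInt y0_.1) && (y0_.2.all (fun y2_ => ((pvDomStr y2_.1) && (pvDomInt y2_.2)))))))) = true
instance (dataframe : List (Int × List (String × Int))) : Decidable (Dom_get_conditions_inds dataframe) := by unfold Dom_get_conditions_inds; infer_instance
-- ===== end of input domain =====

-- B replaces A's single loop with an if/elif tree by one independent filter pass per bucket (alternative decomposition, same cost class).

-- ===== PORT A =====
-- loop body of A: one dict-of-lists accumulator, conditions_inds[k].append(ind) = modify k [] (· ++ [ind]) (every key is present from the start)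
def pvStepA (dataframe : List (Int × List (String × Int)))
    (acc : PySem.Dict String (List Int)) (p : Int × List (String × Int)) :
    PySem.Dict String (List Int) :=
  let ind := p.1
  let row : PySem.Dict String Int := PySem.Dict.mk ((PySem.Dict.mk dataframe).getD ind [])
  let acc :=
    if row.contains "History" && row.contains "No history" then
      let acc :=
        if row.get? "History" == some 1 && row.get? "No history" == some 1 then
          acc.modify "hT_nhT" [] (· ++ [ind])
        else if row.get? "History" == some 1 && row.get? "No history" == some 0 then
          acc.modify "hT_nhF" [] (· ++ [ind])
        else if row.get? "History" == some 0 && row.get? "No history" == some 1 then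
          acc.modify "hF_nhT" [] (· ++ [ind])
        else if row.get? "History" == some 0 && row.get? "No history" == some 0 then
          acc.modify "hF_nhF" [] (· ++ [ind])
        else acc
      acc.modify "h_nh_all" [] (· ++ [ind])
    else if row.contains "History" then acc.modify "only_h" [] (· ++ [ind])
    else if row.contains "No history" then acc.modify "only_nh" [] (· ++ [ind])
    else acc.modify "nothing" [] (· ++ [ind])
  acc.modify "all" [] (· ++ [ind])

def get_conditions_inds (dataframe : List (Int × List (String × Int))) : List (String × List Int) :=
  let init : PySem.Dict String (List Int) :=
    PySem.Dict.mk [("hT_nhT", ([] : List Int)), ("hT_nhF", []), ("hF_nhT", []), ("hF_nhF", []),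
      ("only_h", []), ("only_nh", []), ("nothing", []), ("all", []), ("h_nh_all", [])]
  (dataframe.foldl (pvStepA dataframe) init).items

-- ===== PORT B =====
def pvRowsB (dataframe : List (Int × List (String × Int))) : List (Int × List (String × Int)) :=
  dataframe.map (fun p => (p.1, (PySem.Dict.mk dataframe).getD p.1 []))

def pvBothB (r : List (String × Int)) : Bool :=
  (PySem.Dict.mk r).contains "History" && (PySem.Dict.mk r).contains "No history"

def pvPairB (r : List (String × Int)) : Option Int × Option Int :=
  ((PySem.Dict.mk r).get? "History", (PySem.Dict.mk r).get? "No history")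

def get_conditions_inds_alt (dataframe : List (Int × List (String × Int))) : List (String × List Int) :=
  let rows := pvRowsB dataframe
  let h_nh := rows.filter (fun q => pvBothB q.2)
  [("hT_nhT", (h_nh.filter (fun q => pvPairB q.2 == (some 1, some 1))).map (·.1)),
   ("hT_nhF", (h_nh.filter (fun q => pvPairB q.2 == (some 1, some 0))).map (·.1)),
   ("hF_nhT", (h_nh.filter (fun q => pvPairB q.2 == (some 0, some 1))).map (·.1)),
   ("hF_nhF", (h_nh.filter (fun q => pvPairB q.2 == (some 0, some 0))).map (·.1)),
   ("only_h", (rows.filter (fun q => (PySem.Dict.mk q.2).contains "History" && !(PySem.Dict.mk q.2).contains "No history")).map (·.1)),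
   ("only_nh", (rows.filter (fun q => !(PySem.Dict.mk q.2).contains "History" && (PySem.Dict.mk q.2).contains "No history")).map (·.1)),
   ("nothing", (rows.filter (fun q => !(PySem.Dict.mk q.2).contains "History" && !(PySem.Dict.mk q.2).contains "No history")).map (·.1)),
   ("all", rows.map (·.1)),
   ("h_nh_all", h_nh.map (·.1))]

-- ===== PRECONDITION & SPEC =====
def Spec_get_conditions_inds (dataframe : List (Int × List (String × Int))) (out : List (String × List Int)) : Prop := out = get_conditions_inds_alt dataframe
instance (dataframe : List (Int × List (String × Int))) (out : List (String × List Int)) : Decidable (Spec_get_conditions_inds dataframe out) := by unfold Spec_get_conditions_inds; infer_instance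

-- ===== CLAIM (what is proved, stated in full; the proofs are below) =====
def Claim_equal_get_conditions_inds : Prop := ∀ (dataframe : List (Int × List (String × Int))), Dom_get_conditions_inds dataframe → Spec_get_conditions_inds dataframe (get_conditions_inds dataframe)

-- ===== LEMMAS AND PROOFS =====
-- the bucket keys A's loop body appends p.1 to
def pvTags (dataframe : List (Int × List (String × Int))) (p : Int × List (String × Int)) : List String :=
  let row : PySem.Dict String Int := PySem.Dict.mk ((PySem.Dict.mk dataframe).getD p.1 [])
  (if row.contains "History" && row.contains "No history" then
    (if row.get? "History" == some 1 && row.get? "No history" == some 1 then ["hT_nhT"]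
     else if row.get? "History" == some 1 && row.get? "No history" == some 0 then ["hT_nhF"]
     else if row.get? "History" == some 0 && row.get? "No history" == some 1 then ["hF_nhT"]
     else if row.get? "History" == some 0 && row.get? "No history" == some 0 then ["hF_nhF"]
     else []) ++ ["h_nh_all"]
   else if row.contains "History" then ["only_h"]
   else if row.contains "No history" then ["only_nh"]
   else ["nothing"]) ++ ["all"]

def pvK9 : List String :=
  ["hT_nhT", "hT_nhF", "hF_nhT", "hF_nhF", "only_h", "only_nh", "nothing", "all", "h_nh_all"]

def pvInit : PySem.Dict String (List Int) :=
  PySem.Dict.mk [("hT_nhT", ([] : List Int)), ("hT_nhF", []), ("hF_nhT", []), ("hF_nhF", []),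
    ("only_h", []), ("only_nh", []), ("nothing", []), ("all", []), ("h_nh_all", [])]

set_option maxHeartbeats 1000000 in
lemma pvStepA_getD (dataframe : List (Int × List (String × Int)))
    (d : PySem.Dict String (List Int)) (p : Int × List (String × Int)) (c : String) :
    (pvStepA dataframe d p).getD c [] =
      d.getD c [] ++ (if c ∈ pvTags dataframe p then [p.1] else []) := by
  unfold pvStepA pvTags
  dsimp only
  split_ifs <;>
    simp only [PySem.Dict.getD_modify] <;>
    split_ifs <;> simp_all

lemma pvFold_getD (dataframe xs : List (Int × List (String × Int)))
    (d : PySem.Dict String (List Int)) (c : String) :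
    (xs.foldl (pvStepA dataframe) d).getD c [] =
      d.getD c [] ++ (xs.filter (fun p => decide (c ∈ pvTags dataframe p))).map (·.1) := by
  induction xs generalizing d with
  | nil => simp
  | cons x xs ih =>
    simp only [List.foldl_cons, ih, pvStepA_getD, List.filter_cons]
    by_cases h : c ∈ pvTags dataframe x <;> simp [h]

lemma pvKins {d : PySem.Dict String (List Int)} {k : String}
    (v : List Int) (hk : k ∈ d.keys) : (d.insert k v).keys = d.keys :=
  PySem.Dict.keys_insert_of_contains _ _ (by rw [PySem.Dict.contains_eq_decide_mem_keys]; simpa)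

lemma pvKmod {d : PySem.Dict String (List Int)} {k : String}
    (f : List Int → List Int) (hk : k ∈ d.keys) : (d.modify k [] f).keys = d.keys := by
  rw [PySem.Dict.keys_modify, pvKins _ hk]

lemma pvKmod9 {d : PySem.Dict String (List Int)} {k : String}
    (f : List Int → List Int) (h : d.keys = pvK9) (hk : k ∈ pvK9) :
    (d.modify k [] f).keys = pvK9 := by
  rw [pvKmod f (by rw [h]; exact hk), h]

lemma pvStepA_keys (dataframe : List (Int × List (String × Int)))
    (d : PySem.Dict String (List Int)) (p : Int × List (String × Int))
    (h : d.keys = pvK9) : (pvStepA dataframe d p).keys = pvK9 := by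
  unfold pvStepA
  dsimp only
  split_ifs <;>
    first
      | exact pvKmod9 _ (pvKmod9 _ (pvKmod9 _ h (by decide)) (by decide)) (by decide)
      | exact pvKmod9 _ (pvKmod9 _ h (by decide)) (by decide)

lemma pvFold_keys (dataframe xs : List (Int × List (String × Int)))
    (d : PySem.Dict String (List Int)) (h : d.keys = pvK9) :
    (xs.foldl (pvStepA dataframe) d).keys = pvK9 := by
  induction xs generalizing d with
  | nil => exact h
  | cons x xs ih => exact ih _ (pvStepA_keys _ _ _ h)

lemma pvPt1 (dataframe : List (Int × List (String × Int))) (p : Int × List (String × Int)) :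
    ((pvPairB ((PySem.Dict.mk dataframe).getD p.1 []) == (some 1, some 1)) && pvBothB ((PySem.Dict.mk dataframe).getD p.1 [])) = decide ("hT_nhT" ∈ pvTags dataframe p) := by
  unfold pvTags pvBothB pvPairB; dsimp only; split_ifs <;> simp_all <;> aesop

lemma pvPt2 (dataframe : List (Int × List (String × Int))) (p : Int × List (String × Int)) :
    ((pvPairB ((PySem.Dict.mk dataframe).getD p.1 []) == (some 1, some 0)) && pvBothB ((PySem.Dict.mk dataframe).getD p.1 [])) = decide ("hT_nhF" ∈ pvTags dataframe p) := by
  unfold pvTags pvBothB pvPairB; dsimp only; split_ifs <;> simp_all <;> aesop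

lemma pvPt3 (dataframe : List (Int × List (String × Int))) (p : Int × List (String × Int)) :
    ((pvPairB ((PySem.Dict.mk dataframe).getD p.1 []) == (some 0, some 1)) && pvBothB ((PySem.Dict.mk dataframe).getD p.1 [])) = decide ("hF_nhT" ∈ pvTags dataframe p) := by
  unfold pvTags pvBothB pvPairB; dsimp only; split_ifs <;> simp_all <;> aesop

lemma pvPt4 (dataframe : List (Int × List (String × Int))) (p : Int × List (String × Int)) :
    ((pvPairB ((PySem.Dict.mk dataframe).getD p.1 []) == (some 0, some 0)) && pvBothB ((PySem.Dict.mk dataframe).getD p.1 [])) = decide ("hF_nhF" ∈ pvTags dataframe p) := by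
  unfold pvTags pvBothB pvPairB; dsimp only; split_ifs <;> simp_all <;> aesop

lemma pvPt5 (dataframe : List (Int × List (String × Int))) (p : Int × List (String × Int)) :
    ((PySem.Dict.mk ((PySem.Dict.mk dataframe).getD p.1 [])).contains "History" && !(PySem.Dict.mk ((PySem.Dict.mk dataframe).getD p.1 [])).contains "No history") = decide ("only_h" ∈ pvTags dataframe p) := by
  unfold pvTags; dsimp only; split_ifs <;> simp_all <;> aesop

lemma pvPt6 (dataframe : List (Int × List (String × Int))) (p : Int × List (String × Int)) :
    (!(PySem.Dict.mk ((PySem.Dict.mk dataframe).getD p.1 [])).contains "History" && (PySem.Dict.mk ((PySem.Dict.mk dataframe).getD p.1 [])).contains "No history") = decide ("only_nh" ∈ pvTags dataframe p) := by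
  unfold pvTags; dsimp only; split_ifs <;> simp_all <;> aesop

lemma pvPt7 (dataframe : List (Int × List (String × Int))) (p : Int × List (String × Int)) :
    (!(PySem.Dict.mk ((PySem.Dict.mk dataframe).getD p.1 [])).contains "History" && !(PySem.Dict.mk ((PySem.Dict.mk dataframe).getD p.1 [])).contains "No history") = decide ("nothing" ∈ pvTags dataframe p) := by
  unfold pvTags; dsimp only; split_ifs <;> simp_all <;> aesop

lemma pvPt8 (dataframe : List (Int × List (String × Int))) (p : Int × List (String × Int)) :
    decide ("all" ∈ pvTags dataframe p) = true := by
  unfold pvTags; dsimp only; split_ifs <;> simp_all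

lemma pvPt9 (dataframe : List (Int × List (String × Int))) (p : Int × List (String × Int)) :
    pvBothB ((PySem.Dict.mk dataframe).getD p.1 []) = decide ("h_nh_all" ∈ pvTags dataframe p) := by
  unfold pvTags pvBothB; dsimp only; split_ifs <;> simp_all <;> aesop

-- ===== VERDICT (by name: the statement is the Claim_ definition above) =====
theorem get_conditions_inds_spec : Claim_equal_get_conditions_inds := by
  intro df _
  unfold Spec_get_conditions_inds get_conditions_inds get_conditions_inds_alt
  dsimp only
  have hkeys : (df.foldl (pvStepA df) pvInit).keys = pvK9 := pvFold_keys df df pvInit (by decide)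
  have hnd : (df.foldl (pvStepA df) pvInit).keys.Nodup := by rw [hkeys]; decide
  show (df.foldl (pvStepA df) pvInit).items = _
  rw [PySem.Dict.items_eq_map_keys _ hnd ([] : List Int), hkeys]
  simp only [pvK9, List.map_cons, List.map_nil, pvFold_getD]
  have hinit : ∀ c ∈ pvK9, pvInit.getD c [] = [] := by decide
  rw [hinit "hT_nhT" (by decide), hinit "hT_nhF" (by decide), hinit "hF_nhT" (by decide),
    hinit "hF_nhF" (by decide), hinit "only_h" (by decide), hinit "only_nh" (by decide),
    hinit "nothing" (by decide), hinit "all" (by decide), hinit "h_nh_all" (by decide)]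
  simp only [List.nil_append]
  simp only [pvRowsB, List.filter_filter, List.filter_map, List.map_map, Function.comp_def]
  rw [List.filter_congr (fun p _ => (pvPt1 df p).symm),
      List.filter_congr (fun p _ => (pvPt2 df p).symm),
      List.filter_congr (fun p _ => (pvPt3 df p).symm),
      List.filter_congr (fun p _ => (pvPt4 df p).symm),
      List.filter_congr (fun p _ => (pvPt5 df p).symm),
      List.filter_congr (fun p _ => (pvPt6 df p).symm),
      List.filter_congr (fun p _ => (pvPt7 df p).symm),
      List.filter_congr (fun p _ => (pvPt9 df p).symm)]
  have hall : df.filter (fun p => decide ("all" ∈ pvTags df p)) = df :=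
    List.filter_eq_self.mpr (fun p _ => pvPt8 df p)
  rw [hall]
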